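-- pv_equiv track=rewrite | github.com/KCL-BMEIS/pymagewell | mwcapture/libmwcapture.py | mw_fourcc
-- ===== SOURCE A (Python) =====
-- def mw_fourcc(str):
--     t_val = 0
--     i = 0
--     for c in str:
--         t_num = ord(c)
--         t_val += (t_num<<i)
--         i+=8
--     return t_val
-- ===== SOURCE B (Python) =====
-- def mw_fourcc(str):
--     t_val = 0
--     for c in reversed(str):
--         t_val = t_val * 256 + ord(c)
--     return t_val
-- ===== Notes on version B (the rewrite author's own statement) =====
-- stated objective: alternative
-- what changed: Replaces the forward loop with an explicit bit-offset index by Horner/base-256 evaluation over the reversed string with a single accumulator.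
import Mathlib
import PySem

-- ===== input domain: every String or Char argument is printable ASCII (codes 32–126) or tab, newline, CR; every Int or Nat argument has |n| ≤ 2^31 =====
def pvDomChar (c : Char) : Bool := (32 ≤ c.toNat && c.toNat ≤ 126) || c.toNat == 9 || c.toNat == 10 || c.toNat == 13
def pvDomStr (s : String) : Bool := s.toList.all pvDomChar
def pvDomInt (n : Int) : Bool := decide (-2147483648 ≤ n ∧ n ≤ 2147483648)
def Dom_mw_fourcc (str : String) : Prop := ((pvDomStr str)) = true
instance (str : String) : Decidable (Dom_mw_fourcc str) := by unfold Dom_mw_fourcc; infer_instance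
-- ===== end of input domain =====

-- B replaces A's forward loop with shift index by Horner/base-256 evaluation over the reversed string (alternative decomposition).

-- ===== PORT A =====
-- for c in str: t_val += ord(c) << i; i += 8
def mw_fourcc (str : String) : Int :=
  (str.toList.foldl (fun (st : Int × Int) c =>
    (st.1 + (c.toNat : Int) * 2 ^ st.2.toNat, st.2 + 8)) (0, 0)).1

-- ===== PORT B =====
-- for c in reversed(str): t_val = t_val * 256 + ord(c)
def mw_fourcc_alt (str : String) : Int :=
  str.toList.reverse.foldl (fun t_val c => t_val * 256 + (c.toNat : Int)) 0

-- ===== PRECONDITION & SPEC =====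
def Spec_mw_fourcc (str : String) (out : Int) : Prop := out = mw_fourcc_alt str
instance (str : String) (out : Int) : Decidable (Spec_mw_fourcc str out) := by unfold Spec_mw_fourcc; infer_instance

-- ===== CLAIM (what is proved, stated in full; the proofs are below) =====
def Claim_equal_mw_fourcc : Prop := ∀ (str : String), Dom_mw_fourcc str → Spec_mw_fourcc str (mw_fourcc str)

-- ===== LEMMAS AND PROOFS =====

-- canonical value: base-256 little-endian number of the char list
def pvVal (l : List Char) : Int :=
  match l with
  | [] => 0
  | c :: t => (c.toNat : Int) + 256 * pvVal t

theorem pvA_fold (l : List Char) (v i : Int) (hi : 0 ≤ i) :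
    (l.foldl (fun (st : Int × Int) c =>
      (st.1 + (c.toNat : Int) * 2 ^ st.2.toNat, st.2 + 8)) (v, i)).1
      = v + 2 ^ i.toNat * pvVal l := by
  induction l generalizing v i with
  | nil => simp [pvVal]
  | cons c t ih =>
      simp only [List.foldl, pvVal]
      rw [ih _ _ (by omega)]
      have h8 : (i + 8).toNat = i.toNat + 8 := by omega
      rw [h8, pow_add]
      push_cast
      ring

theorem pvB_fold (l : List Char) :
    l.reverse.foldl (fun t_val c => t_val * 256 + (c.toNat : Int)) 0 = pvVal l := by
  induction l with
  | nil => simp [pvVal]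
  | cons c t ih =>
      simp only [List.reverse_cons, List.foldl_append, List.foldl, pvVal]
      rw [ih]
      ring

-- ===== VERDICT (by name: the statement is the Claim_ definition above) =====
theorem mw_fourcc_spec : Claim_equal_mw_fourcc := by
  intro s _
  show _ = _
  unfold mw_fourcc mw_fourcc_alt
  rw [pvB_fold, pvA_fold _ _ _ le_rfl]
  simp
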